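-- pv_equiv track=rewrite | github.com/alfir3dz1/ISFinal | reversi.py | movablemoves
-- ===== SOURCE A (Python) =====
-- import itertools
--
-- def computer(player):
--     return 'X' if player == 'O' else 'O' if player == 'X' else None
--
-- def movablemoves(board, player, prev_passed=False):
--     board_size = len(board)
--     AI = computer(player)
--     moves = []
--     for x, y in itertools.product(range(board_size), range(board_size)):
--         if board[x][y] != ' ':
--             continue
--         for dx, dy in [(0, 1), (1, 1), (1, 0), (1, -1), (0, -1), (-1, -1), (-1, 0), (-1, 1)]:
--             x_ = x
--             y_ = y
--             valid_move_found = False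
--             found_AI = False
--             while True:
--                 x_ += dx
--                 y_ += dy
--                 if x_ < 0 or x_ >= board_size or y_ < 0 or y_ >= board_size:
--                     break
--                 elif board[x_][y_] == AI:
--                     found_AI = True
--                 elif found_AI and board[x_][y_] == player:
--                     moves.append((x, y))
--                     valid_move_found = True
--                     break
--                 elif board[x_][y_] == ' ' or board[x_][y_] == player:
--                     break
--             if valid_move_found:
--                 break
--     if len(moves) == 0 and not prev_passed and len(movablemoves(board, AI, prev_passed=True)) > 0:
--         return [None]
--     return moves
-- ===== SOURCE B (Python) =====
-- # Legal-move scan by line sweeps: each board line is swept once per direction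
-- # from its far end, carrying two flags about the part already scanned, and the
-- # empty endpoint of every capturing run is collected into a set.
--
-- def computer(player):
--     return 'X' if player == 'O' else 'O' if player == 'X' else None
--
-- DIRS = [(0, 1), (1, 1), (1, 0), (1, -1), (0, -1), (-1, -1), (-1, 0), (-1, 1)]
--
-- def movablemoves(board, player, prev_passed=False):
--     moves = _legal(board, player)
--     if not moves and not prev_passed and _legal(board, computer(player)):
--         return [None]
--     return moves
--
-- def _legal(board, player):
--     n = len(board)
--     opp = computer(player)
--     valid = set()
--     for dx, dy in DIRS:
--         for sx in range(n):
--             for sy in range(n):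
--                 if 0 <= sx - dx < n and 0 <= sy - dy < n:
--                     continue  # not the first cell of its line in this direction
--                 line = []
--                 x, y = sx, sy
--                 while 0 <= x < n and 0 <= y < n:
--                     line.append((x, y))
--                     x += dx
--                     y += dy
--                 # reach: the scanned part starts with a run leading to one of
--                 # our discs; ok: that run also holds an opponent disc to flip.
--                 ok = reach = False
--                 for x, y in reversed(line):
--                     c = board[x][y]
--                     if c == player:
--                         ok, reach = False, True
--                     elif c == opp:
--                         ok = reach
--                     elif c == ' ':
--                         if ok:
--                             valid.add((x, y))
--                         ok = reach = False
--     return [(x, y) for x in range(n) for y in range(n) if (x, y) in valid]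
-- ===== Notes on version B (the rewrite author's own statement) =====
-- stated objective: alternative
-- what changed: Instead of walking outward from every empty cell in all 8 directions with restarts (A), B sweeps each board line once per direction from its far end, carrying two run flags, and collects the empty endpoints of capturing runs into a set read off in row-major order; Pre_ excludes ragged boards, on which A raises IndexError.
import Mathlib
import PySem

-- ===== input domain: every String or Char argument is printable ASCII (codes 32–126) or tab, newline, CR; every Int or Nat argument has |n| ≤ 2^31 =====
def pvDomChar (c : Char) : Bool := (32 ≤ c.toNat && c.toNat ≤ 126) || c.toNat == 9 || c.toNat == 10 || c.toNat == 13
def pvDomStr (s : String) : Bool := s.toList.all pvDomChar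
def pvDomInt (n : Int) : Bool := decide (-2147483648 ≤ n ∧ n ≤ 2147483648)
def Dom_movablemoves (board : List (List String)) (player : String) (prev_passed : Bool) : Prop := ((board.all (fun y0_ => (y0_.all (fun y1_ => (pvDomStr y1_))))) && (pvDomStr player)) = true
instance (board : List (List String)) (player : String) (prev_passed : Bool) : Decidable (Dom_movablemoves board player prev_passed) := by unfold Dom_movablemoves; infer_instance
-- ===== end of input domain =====

-- B replaces A's per-empty-cell outward walk in all 8 directions by one backward sweep
-- per direction over each board line, carrying two run flags and collecting the empty
-- endpoints of capturing runs (a different algorithm, same result).  Equivalence of the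
-- returned list is proved on all non-ragged boards (Pre_); on ragged boards A raises.

-- ===== PORT A =====
-- helpers shared by both ports: Python's computer() (None ↦ Option.none) and the
-- board cell access board[x][y] (all accesses of either program are bounds-checked,
-- so the .getD "" default is never consulted inside Pre_).
def computerO (p : Option String) : Option String :=
  if p == some "O" then some "X" else if p == some "X" then some "O" else none

def cellAt (board : List (List String)) (x y : Int) : String :=
  ((PySem.List.pyGet? board x).bind (fun row => PySem.List.pyGet? row y)).getD ""

def dirsRev : List (Int × Int) := [(0,1),(1,1),(1,0),(1,-1),(0,-1),(-1,-1),(-1,0),(-1,1)]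

-- A's inner 'while True' walk; fuel n+1 is a totality guard only: the walk leaves the
-- n×n board after at most n steps in any of the 8 directions.
def walkA (board : List (List String)) (n : Int) (ai pl : Option String) (dx dy : Int) :
    Int → Int → Bool → Nat → Bool
  | _, _, _, 0 => false
  | x, y, foundAI, fuel+1 =>
    let x_ := x + dx
    let y_ := y + dy
    if x_ < 0 || n ≤ x_ || y_ < 0 || n ≤ y_ then false
    else if some (cellAt board x_ y_) == ai then walkA board n ai pl dx dy x_ y_ true fuel
    else if foundAI && (some (cellAt board x_ y_) == pl) then true
    else if cellAt board x_ y_ == " " || some (cellAt board x_ y_) == pl then false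
    else walkA board n ai pl dx dy x_ y_ foundAI fuel

-- A's direction loop with its 'valid_move_found' break: stop at the first direction
-- whose walk appends the move.
def tryDirsA (board : List (List String)) (n : Int) (ai pl : Option String) (x y : Int) :
    List (Int × Int) → Bool
  | [] => false
  | d :: rest =>
    if walkA board n ai pl d.1 d.2 x y false (n.toNat + 1) then true
    else tryDirsA board n ai pl x y rest

-- the body of movablemoves without the pass logic; Python A's recursive call with
-- prev_passed=True returns exactly this list (its own pass branch cannot fire).
def coreA (board : List (List String)) (pl : Option String) : List (Option (Int × Int)) :=
  let n : Int := (board.length : Int)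
  let ai := computerO pl
  (PySem.List.pyRange 0 n 1).foldl (fun moves x =>
    (PySem.List.pyRange 0 n 1).foldl (fun moves y =>
      if !(cellAt board x y == " ") then moves
      else if tryDirsA board n ai pl x y dirsRev then moves ++ [some (x, y)]
      else moves) moves) []

def movablemoves (board : List (List String)) (player : String) (prev_passed : Bool) :
    List (Option (Int × Int)) :=
  let moves := coreA board (some player)
  if moves.length == 0 && !prev_passed && !((coreA board (computerO (some player))).length == 0)
  then [none] else moves

-- ===== PORT B =====
-- the in-bounds cells of a board line, starting at (x,y), stepping by (dx,dy);
-- fuel n+1 is a totality guard only (the Python while exits after at most n steps).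
def lineFromB (n dx dy : Int) : Int → Int → Nat → List (Int × Int)
  | _, _, 0 => []
  | x, y, fuel+1 =>
    if 0 ≤ x && x < n && 0 ≤ y && y < n then (x, y) :: lineFromB n dx dy (x + dx) (y + dy) fuel
    else []

-- B's backward sweep over one line ('for x, y in reversed(line)'): a right fold carrying
-- (ok, reach, collected set); the if/elif chain of Source B, cells matching no branch
-- leave the state unchanged.
def scanLineB (board : List (List String)) (opp pl : Option String) (line : List (Int × Int))
    (v0 : PySem.Set (Int × Int)) : Bool × Bool × PySem.Set (Int × Int) :=
  line.foldr (fun p st =>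
    if some (cellAt board p.1 p.2) == pl then (false, true, st.2.2)
    else if some (cellAt board p.1 p.2) == opp then (st.2.1, st.2.1, st.2.2)
    else if cellAt board p.1 p.2 == " " then
      (false, false, if st.1 then PySem.Set.add st.2.2 p else st.2.2)
    else st)
    (false, false, v0)

-- B's 'valid' set: for every direction, sweep every line (identified by its first
-- in-bounds cell) once.
def validB (board : List (List String)) (pl : Option String) : PySem.Set (Int × Int) :=
  let n : Int := (board.length : Int)
  let opp := computerO pl
  dirsRev.foldl (fun v d =>
    (PySem.List.pyRange 0 n 1).foldl (fun v sx =>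
      (PySem.List.pyRange 0 n 1).foldl (fun v sy =>
        if 0 ≤ sx - d.1 && sx - d.1 < n && 0 ≤ sy - d.2 && sy - d.2 < n then v
        else (scanLineB board opp pl (lineFromB n d.1 d.2 sx sy (n.toNat + 1)) v).2.2) v) v)
    PySem.Set.empty

-- B's _legal: the collected cells in row-major order.
def coreB (board : List (List String)) (pl : Option String) : List (Option (Int × Int)) :=
  let n : Int := (board.length : Int)
  let v := validB board pl
  (PySem.List.pyRange 0 n 1).flatMap (fun x =>
    ((PySem.List.pyRange 0 n 1).filter (fun y => PySem.Set.contains v (x, y))).map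
      (fun y => some (x, y)))

def movablemoves_alt (board : List (List String)) (player : String) (prev_passed : Bool) :
    List (Option (Int × Int)) :=
  let moves := coreB board (some player)
  if moves.isEmpty && !prev_passed && !(coreB board (computerO (some player))).isEmpty
  then [none] else moves

-- ===== PRECONDITION & SPEC =====
-- Pre_ excludes exactly the ragged boards (some row shorter than the number of rows),
-- on which the Python A raises IndexError.
def Pre_movablemoves (board : List (List String)) (player : String) (prev_passed : Bool) : Prop :=
  ∀ row ∈ board, board.length ≤ row.length
instance (board : List (List String)) (player : String) (prev_passed : Bool) :
    Decidable (Pre_movablemoves board player prev_passed) := by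
  unfold Pre_movablemoves; infer_instance

def pvWitness_movablemoves : List (List String) × String × Bool :=
  ([[" ", "X"], ["O", " "]], "X", false)

def Spec_movablemoves (board : List (List String)) (player : String) (prev_passed : Bool) (out : List (Option (Int × Int))) : Prop := out = movablemoves_alt board player prev_passed
instance (board : List (List String)) (player : String) (prev_passed : Bool) (out : List (Option (Int × Int))) : Decidable (Spec_movablemoves board player prev_passed out) := by unfold Spec_movablemoves; infer_instance

-- ===== CLAIM (what is proved, stated in full; the proofs are below) =====
def Claim_equal_movablemoves : Prop := ∀ (board : List (List String)) (player : String) (prev_passed : Bool), Dom_movablemoves board player prev_passed → Pre_movablemoves board player prev_passed → Spec_movablemoves board player prev_passed (movablemoves board player prev_passed)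

-- ===== LEMMAS AND PROOFS =====

-- classification of a cell seen during a walk: 0 = AI disc, 1 = player disc, 2 = empty, 3 = other
def clsB (ai pl : Option String) (c : String) : Nat :=
  if some c == ai then 0 else if some c == pl then 1 else if c == " " then 2 else 3

-- the flag machine run by A's walk, as a predicate on the list of cells beyond the move cell
def loopB (board : List (List String)) (ai pl : Option String) : Bool → List (Int × Int) → Bool
  | _, [] => false
  | flag, p :: t =>
    if clsB ai pl (cellAt board p.1 p.2) == 0 then loopB board ai pl true t
    else if flag && (clsB ai pl (cellAt board p.1 p.2) == 1) then true
    else if (clsB ai pl (cellAt board p.1 p.2) == 2) || (clsB ai pl (cellAt board p.1 p.2) == 1) then false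
    else loopB board ai pl flag t

def inbB (n x y : Int) : Bool := 0 ≤ x && x < n && 0 ≤ y && y < n

-- fuel that provably suffices for lineFromB to reach the edge from (x,y)
def fuelNeed (n dx dy x y : Int) : Nat :=
  (if dx = 1 then n - x else if dx = -1 then x + 1 else if dy = 1 then n - y else y + 1).toNat

def backNeed (n dx dy x y : Int) : Nat := fuelNeed n (-dx) (-dy) x y

def IsDir (dx dy : Int) : Prop := (dx = 0 ∨ dx = 1 ∨ dx = -1) ∧ (dy = 0 ∨ dy = 1 ∨ dy = -1) ∧ ¬(dx = 0 ∧ dy = 0)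

theorem isDir_of_mem_dirsRev {d : Int × Int} (h : d ∈ dirsRev) : IsDir d.1 d.2 := by
  fin_cases h <;> exact ⟨by decide, by decide, by decide⟩

theorem computerO_ne_self (pl : Option String) : pl = none ∨ computerO pl ≠ pl := by
  cases pl with
  | none => exact Or.inl rfl
  | some s =>
    refine Or.inr ?_
    unfold computerO
    split_ifs with h1 h2
    · simp only [beq_iff_eq, Option.some.injEq] at h1
      subst h1; decide
    · simp only [beq_iff_eq, Option.some.injEq] at h2
      subst h2; decide
    · simp

theorem computerO_ne_space (pl : Option String) : computerO pl ≠ some " " := by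
  unfold computerO
  split_ifs <;> simp

theorem computerO_space : computerO (some " ") = none := by decide

theorem clsB_eq_two (ai pl : Option String) (c : String) :
    clsB ai pl c = 2 ↔ (some c ≠ ai ∧ some c ≠ pl ∧ c = " ") := by
  unfold clsB; split_ifs <;> simp_all

theorem loopB_none (board : List (List String)) (pl : Option String) :
    ∀ l : List (Int × Int), loopB board none pl false l = false := by
  intro l
  induction l with
  | nil => rfl
  | cons p t ih =>
    have h0 : (clsB none pl (cellAt board p.1 p.2) == 0) = false := by
      unfold clsB; split_ifs <;> simp_all
    simp only [loopB, h0, Bool.false_eq_true, if_false, Bool.false_and, Bool.false_eq_true, if_false]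
    split
    · rfl
    · exact ih

theorem fuelNeed_step {n dx dy x y : Int} (hd : IsDir dx dy) (h : inbB n x y = true) :
    1 ≤ fuelNeed n dx dy x y ∧ fuelNeed n dx dy (x + dx) (y + dy) + 1 = fuelNeed n dx dy x y := by
  simp only [inbB, Bool.and_eq_true, decide_eq_true_eq] at h
  obtain ⟨hdx, hdy, hne⟩ := hd
  rcases hdx with h1 | h1 | h1 <;> rcases hdy with h2 | h2 | h2 <;>
    subst h1 <;> subst h2 <;> simp [fuelNeed] <;> omega

theorem fuelNeed_le {n dx dy x y : Int} (h : inbB n x y = true) :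
    fuelNeed n dx dy x y ≤ n.toNat := by
  simp only [inbB, Bool.and_eq_true, decide_eq_true_eq] at h
  unfold fuelNeed; split_ifs <;> omega

theorem backNeed_step {n dx dy x y : Int} (hd : IsDir dx dy) (h : inbB n x y = true) :
    1 ≤ backNeed n dx dy x y ∧ backNeed n dx dy (x - dx) (y - dy) + 1 = backNeed n dx dy x y := by
  have hd' : IsDir (-dx) (-dy) := by
    obtain ⟨a, b, c⟩ := hd; exact ⟨by omega, by omega, by omega⟩
  have h2 := fuelNeed_step (n := n) (x := x) (y := y) hd' h
  unfold backNeed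
  refine ⟨h2.1, ?_⟩
  have h3 : fuelNeed n (-dx) (-dy) (x + -dx) (y + -dy) + 1 = fuelNeed n (-dx) (-dy) x y := h2.2
  simpa [sub_eq_add_neg] using h3

theorem walkA_eq_loopB (board : List (List String)) (n : Int) (ai pl : Option String)
    (dx dy : Int) : ∀ (fuel : Nat) (x y : Int) (flag : Bool),
    walkA board n ai pl dx dy x y flag fuel
      = loopB board ai pl flag (lineFromB n dx dy (x + dx) (y + dy) fuel) := by
  intro fuel
  induction fuel with
  | zero => intro x y flag; simp [walkA, lineFromB, loopB]
  | succ fuel ih =>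
    intro x y flag
    by_cases hb : (0 ≤ x + dx ∧ x + dx < n ∧ 0 ≤ y + dy ∧ y + dy < n)
    · have hg : (x + dx < 0 || n ≤ x + dx || y + dy < 0 || n ≤ y + dy) = false := by
        simp; omega
      have hg' : (0 ≤ x + dx && x + dx < n && 0 ≤ y + dy && y + dy < n) = true := by
        simp; omega
      rw [show lineFromB n dx dy (x + dx) (y + dy) (fuel + 1)
            = (x + dx, y + dy) :: lineFromB n dx dy (x + dx + dx) (y + dy + dy) fuel from by
          simp [lineFromB, hg']]
      simp only [walkA, hg, Bool.false_eq_true, if_false]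
      by_cases h0 : (some (cellAt board (x + dx) (y + dy)) == ai) = true
      · simp [h0, loopB, clsB, ih]
      · by_cases h1 : (some (cellAt board (x + dx) (y + dy)) == pl) = true
        · by_cases hf : flag
          · simp [h0, h1, hf, loopB, clsB]
          · simp [h0, h1, hf, loopB, clsB]
        · by_cases h2 : (cellAt board (x + dx) (y + dy) == " ") = true
          · simp [h0, h1, h2, loopB, clsB]
          · simp [h0, h1, h2, loopB, clsB, ih]
    · have hg : (x + dx < 0 || n ≤ x + dx || y + dy < 0 || y + dy ≥ n) = true := by
        simp; omega
      have hg' : (0 ≤ x + dx && x + dx < n && 0 ≤ y + dy && y + dy < n) = false := by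
        simp; omega
      simp [walkA, lineFromB, hg, hg', loopB]

theorem tryDirsA_eq_any (board : List (List String)) (n : Int) (ai pl : Option String)
    (x y : Int) (ds : List (Int × Int)) :
    tryDirsA board n ai pl x y ds
      = ds.any (fun d => walkA board n ai pl d.1 d.2 x y false (n.toNat + 1)) := by
  induction ds with
  | nil => rfl
  | cons d rest ih =>
    simp only [tryDirsA, List.any_cons, ih]
    by_cases h : walkA board n ai pl d.1 d.2 x y false (n.toNat + 1) = true <;> simp [h]

-- the if/elif chain of Source B lands in the branch named by clsB (needs opp ≠ pl unless pl = none)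
theorem scanLineB_flags (board : List (List String)) (opp pl : Option String)
    (hap : pl = none ∨ opp ≠ pl) (l : List (Int × Int)) (v0 : PySem.Set (Int × Int)) :
    (scanLineB board opp pl l v0).1 = loopB board opp pl false l ∧
      (scanLineB board opp pl l v0).2.1 = loopB board opp pl true l := by
  induction l with
  | nil => simp [scanLineB, loopB]
  | cons p t ih =>
    have hcons : scanLineB board opp pl (p :: t) v0 =
        (if some (cellAt board p.1 p.2) == pl then (false, true, (scanLineB board opp pl t v0).2.2)
         else if some (cellAt board p.1 p.2) == opp then
           ((scanLineB board opp pl t v0).2.1, (scanLineB board opp pl t v0).2.1,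
            (scanLineB board opp pl t v0).2.2)
         else if cellAt board p.1 p.2 == " " then
           (false, false,
            if (scanLineB board opp pl t v0).1 then
              PySem.Set.add (scanLineB board opp pl t v0).2.2 p
            else (scanLineB board opp pl t v0).2.2)
         else scanLineB board opp pl t v0) := rfl
    by_cases hp : (some (cellAt board p.1 p.2) == pl) = true
    · have ha : (some (cellAt board p.1 p.2) == opp) = false := by
        rcases hap with rfl | hne
        · simp at hp
        · simp only [beq_iff_eq] at hp
          simp only [beq_eq_false_iff_ne, ne_eq]
          intro h; exact hne (h ▸ hp ▸ rfl)
      have hcls : clsB opp pl (cellAt board p.1 p.2) = 1 := by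
        unfold clsB; rw [if_neg (by simp_all), if_pos hp]
      rw [hcons, if_pos hp]
      constructor <;> simp [loopB, hcls]
    · by_cases ha : (some (cellAt board p.1 p.2) == opp) = true
      · have hcls : clsB opp pl (cellAt board p.1 p.2) = 0 := by
          unfold clsB; rw [if_pos ha]
        rw [hcons, if_neg (by simp_all), if_pos ha]
        constructor <;> simp [loopB, hcls, ih.2]
      · by_cases hs : (cellAt board p.1 p.2 == " ") = true
        · have hcls : clsB opp pl (cellAt board p.1 p.2) = 2 := by
            unfold clsB; rw [if_neg (by simp_all), if_neg (by simp_all), if_pos hs]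
          rw [hcons, if_neg (by simp_all), if_neg (by simp_all)]
          constructor <;> simp [loopB, hcls, hs]
        · have hcls : clsB opp pl (cellAt board p.1 p.2) = 3 := by
            unfold clsB
            rw [if_neg (by simp_all), if_neg (by simp_all), if_neg (by simp_all)]
          rw [hcons, if_neg (by simp_all), if_neg (by simp_all), if_neg (by simp_all)]
          constructor <;> simp [loopB, hcls, ih.1, ih.2]

theorem scanLineB_mem (board : List (List String)) (opp pl : Option String)
    (hap : pl = none ∨ opp ≠ pl) (q : Int × Int) :
    ∀ (l : List (Int × Int)) (v0 : PySem.Set (Int × Int)),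
    (q ∈ (scanLineB board opp pl l v0).2.2 ↔
      q ∈ v0 ∨ (clsB opp pl (cellAt board q.1 q.2) = 2 ∧
        ∃ u t, l = u ++ q :: t ∧ loopB board opp pl false t = true)) := by
  intro l
  induction l with
  | nil =>
    intro v0
    simp only [scanLineB, List.foldr_nil]
    constructor
    · intro h; exact Or.inl h
    · rintro (h | ⟨-, u, t, h, -⟩)
      · exact h
      · exact absurd h (by simp)
  | cons p tl ih =>
    intro v0
    have hm1 : (scanLineB board opp pl tl v0).1 = loopB board opp pl false tl :=
      (scanLineB_flags board opp pl hap tl v0).1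
    -- the set component of the step: add p iff p's cell is class 2 and the tail's ok flag
    have hcons : scanLineB board opp pl (p :: tl) v0 =
        (if some (cellAt board p.1 p.2) == pl then (false, true, (scanLineB board opp pl tl v0).2.2)
         else if some (cellAt board p.1 p.2) == opp then
           ((scanLineB board opp pl tl v0).2.1, (scanLineB board opp pl tl v0).2.1,
            (scanLineB board opp pl tl v0).2.2)
         else if cellAt board p.1 p.2 == " " then
           (false, false,
            if (scanLineB board opp pl tl v0).1 then
              PySem.Set.add (scanLineB board opp pl tl v0).2.2 p
            else (scanLineB board opp pl tl v0).2.2)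
         else scanLineB board opp pl tl v0) := rfl
    have hset : (scanLineB board opp pl (p :: tl) v0).2.2 =
        if clsB opp pl (cellAt board p.1 p.2) = 2 ∧ (scanLineB board opp pl tl v0).1 = true
        then PySem.Set.add (scanLineB board opp pl tl v0).2.2 p
        else (scanLineB board opp pl tl v0).2.2 := by
      rw [hcons]
      by_cases hp : (some (cellAt board p.1 p.2) == pl) = true
      · rw [if_pos hp,
          if_neg (fun h => ((clsB_eq_two opp pl _).1 h.1).2.1 (by simpa using hp))]
      · by_cases ha : (some (cellAt board p.1 p.2) == opp) = true
        · rw [if_neg (by simp_all), if_pos ha,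
            if_neg (fun h => ((clsB_eq_two opp pl _).1 h.1).1 (by simpa using ha))]
        · by_cases hs : (cellAt board p.1 p.2 == " ") = true
          · have hcls : clsB opp pl (cellAt board p.1 p.2) = 2 := by
              rw [clsB_eq_two]
              exact ⟨by simpa using ha, by simpa using hp, by simpa using hs⟩
            rw [if_neg (by simp_all), if_neg (by simp_all), if_pos hs]
            by_cases hok : (scanLineB board opp pl tl v0).1 = true
            · rw [if_pos hok, if_pos ⟨hcls, hok⟩]
            · rw [if_neg hok, if_neg (fun h => hok h.2)]
          · rw [if_neg (by simp_all), if_neg (by simp_all), if_neg hs,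
              if_neg (fun h => (by simpa using hs : cellAt board p.1 p.2 ≠ " ")
                ((clsB_eq_two opp pl _).1 h.1).2.2)]
    rw [hset]
    constructor
    · intro hmem
      by_cases hc : (clsB opp pl (cellAt board p.1 p.2) = 2 ∧ (scanLineB board opp pl tl v0).1 = true)
      · rw [if_pos hc] at hmem
        rcases (PySem.Set.mem_add _ _ _).1 hmem with hin | rfl
        · rcases (ih v0).1 hin with hv | ⟨hcell, u, t, rfl, hl⟩
          · exact Or.inl hv
          · exact Or.inr ⟨hcell, p :: u, t, rfl, hl⟩
        · exact Or.inr ⟨hc.1, [], tl, rfl, by rw [← hm1]; exact hc.2⟩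
      · rw [if_neg hc] at hmem
        rcases (ih v0).1 hmem with hv | ⟨hcell, u, t, rfl, hl⟩
        · exact Or.inl hv
        · exact Or.inr ⟨hcell, p :: u, t, rfl, hl⟩
    · intro h
      have hsub : q ∈ (scanLineB board opp pl tl v0).2.2 → q ∈
          (if clsB opp pl (cellAt board p.1 p.2) = 2 ∧ (scanLineB board opp pl tl v0).1 = true
           then PySem.Set.add (scanLineB board opp pl tl v0).2.2 p
           else (scanLineB board opp pl tl v0).2.2) := by
        intro hx
        split
        · exact (PySem.Set.mem_add _ _ _).2 (Or.inl hx)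
        · exact hx
      rcases h with hv | ⟨hcell, u, t, hdec, hl⟩
      · exact hsub ((ih v0).2 (Or.inl hv))
      · cases u with
        | nil =>
          simp only [List.nil_append, List.cons.injEq] at hdec
          obtain ⟨rfl, rfl⟩ := hdec
          rw [if_pos ⟨hcell, by rw [hm1]; exact hl⟩]
          exact (PySem.Set.mem_add _ _ _).2 (Or.inr rfl)
        | cons a u' =>
          simp only [List.cons_append, List.cons.injEq] at hdec
          obtain ⟨rfl, hdec⟩ := hdec
          exact hsub ((ih v0).2 (Or.inr ⟨hcell, u', t, hdec, hl⟩))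

theorem lineFromB_decomp {n dx dy : Int} (hd : IsDir dx dy) :
    ∀ (u : List (Int × Int)) (f : Nat) (x y : Int) (q : Int × Int) (t : List (Int × Int)),
    lineFromB n dx dy x y f = u ++ q :: t → fuelNeed n dx dy x y ≤ f →
    inbB n q.1 q.2 = true ∧ ∃ g, t = lineFromB n dx dy (q.1 + dx) (q.2 + dy) g ∧
      fuelNeed n dx dy (q.1 + dx) (q.2 + dy) ≤ g := by
  intro u
  induction u with
  | nil =>
    intro f x y q t hline hfuel
    cases f with
    | zero => exact absurd hline (by simp [lineFromB])
    | succ f =>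
      by_cases hb : (0 ≤ x && x < n && 0 ≤ y && y < n) = true
      · rw [show lineFromB n dx dy x y (f+1) = (x,y) :: lineFromB n dx dy (x+dx) (y+dy) f from by
            simp [lineFromB, hb]] at hline
        simp only [List.nil_append, List.cons.injEq] at hline
        obtain ⟨rfl, rfl⟩ := hline
        have hb' : inbB n x y = true := hb
        refine ⟨hb', f, rfl, ?_⟩
        have := fuelNeed_step hd hb'
        show fuelNeed n dx dy (x + dx) (y + dy) ≤ f
        omega
      · rw [show lineFromB n dx dy x y (f+1) = [] from by
            simp only [lineFromB]; rw [if_neg hb]] at hline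
        exact absurd hline (by simp)
  | cons a u' ih =>
    intro f x y q t hline hfuel
    cases f with
    | zero => exact absurd hline (by simp [lineFromB])
    | succ f =>
      by_cases hb : (0 ≤ x && x < n && 0 ≤ y && y < n) = true
      · rw [show lineFromB n dx dy x y (f+1) = (x,y) :: lineFromB n dx dy (x+dx) (y+dy) f from by
            simp [lineFromB, hb]] at hline
        simp only [List.cons_append, List.cons.injEq] at hline
        obtain ⟨rfl, hline⟩ := hline
        have hb' : inbB n x y = true := hb
        have := fuelNeed_step hd hb'
        exact ih f (x+dx) (y+dy) q t hline (by omega)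
      · rw [show lineFromB n dx dy x y (f+1) = [] from by
            simp only [lineFromB]; rw [if_neg hb]] at hline
        exact absurd hline (by simp)

theorem lineFromB_stable {n dx dy : Int} (hd : IsDir dx dy) :
    ∀ (f g : Nat) (x y : Int), fuelNeed n dx dy x y ≤ f → fuelNeed n dx dy x y ≤ g →
    lineFromB n dx dy x y f = lineFromB n dx dy x y g := by
  intro f
  induction f with
  | zero =>
    intro g x y hf hg
    have hb : (0 ≤ x && x < n && 0 ≤ y && y < n) = false := by
      by_contra h
      have hb' : inbB n x y = true := by
        simp only [inbB]; exact Bool.of_not_eq_false h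
      have := fuelNeed_step hd hb'
      omega
    cases g with
    | zero => rfl
    | succ g => simp only [lineFromB]; rw [if_neg (by simp [hb])]
  | succ f ih =>
    intro g x y hf hg
    by_cases hb : (0 ≤ x && x < n && 0 ≤ y && y < n) = true
    · have hb' : inbB n x y = true := hb
      have hs := fuelNeed_step hd hb'
      cases g with
      | zero => omega
      | succ g =>
        simp only [lineFromB]
        rw [if_pos hb, if_pos hb]
        congr 1
        exact ih g (x+dx) (y+dy) (by omega) (by omega)
    · cases g with
      | zero =>
        simp only [lineFromB]; rw [if_neg hb]
      | succ g =>
        simp only [lineFromB]; rw [if_neg hb, if_neg hb]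

theorem line_cover {n dx dy : Int} (hd : IsDir dx dy) :
    ∀ (m : Nat) (q1 q2 : Int), backNeed n dx dy q1 q2 ≤ m → inbB n q1 q2 = true →
    ∃ sx sy u g, inbB n sx sy = true ∧ inbB n (sx - dx) (sy - dy) = false ∧
      lineFromB n dx dy sx sy (n.toNat + 1)
        = u ++ (q1, q2) :: lineFromB n dx dy (q1 + dx) (q2 + dy) g ∧
      fuelNeed n dx dy (q1 + dx) (q2 + dy) ≤ g := by
  intro m
  induction m with
  | zero =>
    intro q1 q2 hm hq
    have := backNeed_step hd hq
    omega
  | succ m ih =>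
    intro q1 q2 hm hq
    have hfs := fuelNeed_step hd hq
    by_cases hprev : inbB n (q1 - dx) (q2 - dy) = true
    · have hbs := backNeed_step hd hq
      obtain ⟨sx, sy, u, g, h1, h2, h3, h4⟩ := ih (q1 - dx) (q2 - dy) (by omega) hprev
      rw [show q1 - dx + dx = q1 from by ring, show q2 - dy + dy = q2 from by ring] at h3 h4
      have hg1 : 1 ≤ fuelNeed n dx dy q1 q2 := hfs.1
      cases g with
      | zero => omega
      | succ g' =>
        rw [show lineFromB n dx dy q1 q2 (g' + 1)
              = (q1, q2) :: lineFromB n dx dy (q1 + dx) (q2 + dy) g' from by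
            simp only [lineFromB]; rw [if_pos (show (0 ≤ q1 && q1 < n && 0 ≤ q2 && q2 < n) = true from hq)]] at h3
        refine ⟨sx, sy, u ++ [(q1 - dx, q2 - dy)], g', h1, h2, ?_, by omega⟩
        rw [h3]; simp
    · refine ⟨q1, q2, [], n.toNat, hq, by simpa using hprev, ?_, ?_⟩
      · rw [show lineFromB n dx dy q1 q2 (n.toNat + 1)
              = (q1, q2) :: lineFromB n dx dy (q1 + dx) (q2 + dy) n.toNat from by
            simp only [lineFromB]; rw [if_pos (show (0 ≤ q1 && q1 < n && 0 ≤ q2 && q2 < n) = true from hq)]]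
        simp
      · have := fuelNeed_le (dx := dx) (dy := dy) hq
        omega

theorem mem_foldl_set_iff {α : Type} (q : Int × Int)
    (step : PySem.Set (Int × Int) → α → PySem.Set (Int × Int)) (M : α → Prop)
    (h : ∀ v a, q ∈ step v a ↔ q ∈ v ∨ M a) :
    ∀ (l : List α) (v0 : PySem.Set (Int × Int)),
      q ∈ l.foldl step v0 ↔ q ∈ v0 ∨ ∃ a ∈ l, M a := by
  intro l
  induction l with
  | nil => simp
  | cons a rest ih =>
    intro v0
    simp only [List.foldl_cons, ih, h, List.mem_cons]
    constructor
    · rintro ((hv | hm) | ⟨b, hb, hM⟩)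
      · exact Or.inl hv
      · exact Or.inr ⟨a, Or.inl rfl, hm⟩
      · exact Or.inr ⟨b, Or.inr hb, hM⟩
    · rintro (hv | ⟨b, (rfl | hb), hM⟩)
      · exact Or.inl (Or.inl hv)
      · exact Or.inl (Or.inr hM)
      · exact Or.inr ⟨b, hb, hM⟩

theorem validB_iff (board : List (List String)) (pl : Option String) (q1 q2 : Int)
    (hq : inbB (board.length : Int) q1 q2 = true) :
    ((q1, q2) ∈ validB board pl ↔
      clsB (computerO pl) pl (cellAt board q1 q2) = 2 ∧ ∃ d ∈ dirsRev,
        loopB board (computerO pl) pl false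
          (lineFromB (board.length : Int) d.1 d.2 (q1 + d.1) (q2 + d.2)
            ((board.length : Int).toNat + 1)) = true) := by
  set n : Int := (board.length : Int) with hn
  set ai := computerO pl with hai
  have hap : pl = none ∨ ai ≠ pl := by
    rcases computerO_ne_self pl with h | h
    · exact Or.inl h
    · exact Or.inr (by rw [hai]; exact h)
  have hmem : ((q1, q2) ∈ validB board pl ↔
      ∃ d ∈ dirsRev, ∃ sx ∈ PySem.List.pyRange 0 n 1, ∃ sy ∈ PySem.List.pyRange 0 n 1,
        inbB n (sx - d.1) (sy - d.2) = false ∧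
        (clsB ai pl (cellAt board q1 q2) = 2 ∧ ∃ u t,
          lineFromB n d.1 d.2 sx sy (n.toNat + 1) = u ++ (q1, q2) :: t ∧
          loopB board ai pl false t = true)) := by
    have hin : ∀ (d : Int × Int) (sx : Int) (v : PySem.Set (Int × Int)) (sy : Int),
        ((q1, q2) ∈ (if 0 ≤ sx - d.1 && sx - d.1 < n && 0 ≤ sy - d.2 && sy - d.2 < n then v
          else (scanLineB board ai pl (lineFromB n d.1 d.2 sx sy (n.toNat + 1)) v).2.2) ↔
          (q1, q2) ∈ v ∨ (inbB n (sx - d.1) (sy - d.2) = false ∧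
            (clsB ai pl (cellAt board q1 q2) = 2 ∧ ∃ u t,
              lineFromB n d.1 d.2 sx sy (n.toNat + 1) = u ++ (q1, q2) :: t ∧
              loopB board ai pl false t = true))) := by
      intro d sx v sy
      by_cases hc : (0 ≤ sx - d.1 && sx - d.1 < n && 0 ≤ sy - d.2 && sy - d.2 < n) = true
      · rw [if_pos hc]
        have : inbB n (sx - d.1) (sy - d.2) = true := hc
        simp [this]
      · rw [if_neg hc]
        rw [scanLineB_mem board ai pl hap]
        have : inbB n (sx - d.1) (sy - d.2) = false := by
          simpa [inbB] using hc
        simp [this]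
    have hmid : ∀ (d : Int × Int) (v : PySem.Set (Int × Int)) (sx : Int),
        ((q1, q2) ∈ (PySem.List.pyRange 0 n 1).foldl (fun v sy =>
            if 0 ≤ sx - d.1 && sx - d.1 < n && 0 ≤ sy - d.2 && sy - d.2 < n then v
            else (scanLineB board ai pl (lineFromB n d.1 d.2 sx sy (n.toNat + 1)) v).2.2) v ↔
          (q1, q2) ∈ v ∨ ∃ sy ∈ PySem.List.pyRange 0 n 1,
            inbB n (sx - d.1) (sy - d.2) = false ∧
            (clsB ai pl (cellAt board q1 q2) = 2 ∧ ∃ u t,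
              lineFromB n d.1 d.2 sx sy (n.toNat + 1) = u ++ (q1, q2) :: t ∧
              loopB board ai pl false t = true)) := by
      intro d v sx
      exact mem_foldl_set_iff (q1, q2) _ _ (hin d sx) _ v
    have houter : ∀ (v : PySem.Set (Int × Int)) (d : Int × Int),
        ((q1, q2) ∈ (PySem.List.pyRange 0 n 1).foldl (fun v sx =>
            (PySem.List.pyRange 0 n 1).foldl (fun v sy =>
              if 0 ≤ sx - d.1 && sx - d.1 < n && 0 ≤ sy - d.2 && sy - d.2 < n then v
              else (scanLineB board ai pl (lineFromB n d.1 d.2 sx sy (n.toNat + 1)) v).2.2) v) v ↔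
          (q1, q2) ∈ v ∨ ∃ sx ∈ PySem.List.pyRange 0 n 1, ∃ sy ∈ PySem.List.pyRange 0 n 1,
            inbB n (sx - d.1) (sy - d.2) = false ∧
            (clsB ai pl (cellAt board q1 q2) = 2 ∧ ∃ u t,
              lineFromB n d.1 d.2 sx sy (n.toNat + 1) = u ++ (q1, q2) :: t ∧
              loopB board ai pl false t = true)) := by
      intro v d
      exact mem_foldl_set_iff (q1, q2) _ _ (fun v sx => hmid d v sx) _ v
    have := mem_foldl_set_iff (q1, q2) _ _ (fun v d => houter v d) dirsRev PySem.Set.empty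
    unfold validB
    rw [← hn, ← hai] at *
    simpa [PySem.Set.empty] using this
  rw [hmem]
  constructor
  · rintro ⟨d, hd, sx, hsx, sy, hsy, hskip, hcell, u, t, hdec, hloop⟩
    have hdir := isDir_of_mem_dirsRev hd
    have hsb : inbB n sx sy = true := by
      rw [PySem.List.mem_pyRange_one] at hsx hsy
      simp [inbB]; omega
    have hfs : fuelNeed n d.1 d.2 sx sy ≤ n.toNat + 1 := by
      have := fuelNeed_le (dx := d.1) (dy := d.2) hsb; omega
    obtain ⟨hqin, g, rfl, hg⟩ := lineFromB_decomp hdir u (n.toNat + 1) sx sy (q1, q2) t hdec hfs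
    refine ⟨hcell, d, hd, ?_⟩
    rw [lineFromB_stable hdir (n.toNat + 1) g ((q1, q2).1 + d.1) ((q1, q2).2 + d.2) ?_ hg]
    · exact hloop
    · have h1 := fuelNeed_step hdir hqin
      have h2 := fuelNeed_le (dx := d.1) (dy := d.2) hqin
      omega
  · rintro ⟨hcell, d, hd, hloop⟩
    have hdir := isDir_of_mem_dirsRev hd
    obtain ⟨sx, sy, u, g, hsb, hstart, hdec, hg⟩ :=
      line_cover hdir (backNeed n d.1 d.2 q1 q2) q1 q2 le_rfl hq
    have hfn1 : fuelNeed n d.1 d.2 (q1 + d.1) (q2 + d.2) ≤ n.toNat + 1 := by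
      have h1 := fuelNeed_step hdir hq
      have h2 := fuelNeed_le (dx := d.1) (dy := d.2) hq
      omega
    refine ⟨d, hd, sx, ?_, sy, ?_, hstart, hcell, u, _, hdec, ?_⟩
    · rw [PySem.List.mem_pyRange_one]
      simp only [inbB, Bool.and_eq_true, decide_eq_true_eq] at hsb
      omega
    · rw [PySem.List.mem_pyRange_one]
      simp only [inbB, Bool.and_eq_true, decide_eq_true_eq] at hsb
      omega
    · rw [lineFromB_stable hdir g (n.toNat + 1) (q1 + d.1) (q2 + d.2) hg hfn1]
      exact hloop

theorem coreA_eq_coreB (board : List (List String)) (pl : Option String) :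
    coreA board pl = coreB board pl := by
  simp only [coreA, coreB]
  set n : Int := (board.length : Int) with hn
  set ai := computerO pl with hai
  have hinner : ∀ (x : Int) (moves : List (Option (Int × Int))),
      (PySem.List.pyRange 0 n 1).foldl (fun moves y =>
          if !(cellAt board x y == " ") then moves
          else if tryDirsA board n ai pl x y dirsRev then moves ++ [some (x, y)]
          else moves) moves
        = moves ++ ((PySem.List.pyRange 0 n 1).filter
            (fun y => (cellAt board x y == " ") && tryDirsA board n ai pl x y dirsRev)).map
              (fun y => (some (x, y) : Option (Int × Int))) := by
    intro x moves
    rw [show (fun (moves : List (Option (Int × Int))) (y : Int) =>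
          if !(cellAt board x y == " ") then moves
          else if tryDirsA board n ai pl x y dirsRev then moves ++ [some (x, y)]
          else moves)
        = (fun (moves : List (Option (Int × Int))) (y : Int) =>
          if (cellAt board x y == " ") && tryDirsA board n ai pl x y dirsRev
          then moves ++ [some (x, y)] else moves) from ?_]
    · exact PySem.List.foldl_append_if _ _ _ _
    · funext moves y
      cases hc : (cellAt board x y == " ") <;>
        cases ht : tryDirsA board n ai pl x y dirsRev <;> simp
  have h1 := PySem.List.foldl_congr_mem (PySem.List.pyRange 0 n 1) _ _
    ([] : List (Option (Int × Int))) (fun moves x _hx => hinner x moves)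
  refine h1.trans ?_
  rw [PySem.List.foldl_append_eq_flatMap, List.nil_append]
  rw [List.flatMap_def, List.flatMap_def]
  congr 1
  refine List.map_congr_left ?_
  intro x hx
  congr 1
  refine List.filter_congr ?_
  intro y hy
  rw [PySem.List.mem_pyRange_one] at hx hy
  have hinb : inbB n x y = true := by simp only [inbB]; simp; omega
  rw [Bool.eq_iff_iff, Bool.and_eq_true, beq_iff_eq, tryDirsA_eq_any, List.any_eq_true,
    PySem.Set.contains_iff, validB_iff board pl x y hinb]
  constructor
  · rintro ⟨hsp, d, hd, hw⟩
    rw [walkA_eq_loopB] at hw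
    by_cases hp : (some (cellAt board x y) == pl) = true
    · -- pl = some " ", hence ai = computerO (some " ") = none and the walk cannot succeed
      exfalso
      simp only [beq_iff_eq, hsp] at hp
      rw [hai, ← hp, computerO_space] at hw
      rw [loopB_none] at hw
      exact absurd hw (by simp)
    · refine ⟨?_, d, hd, hw⟩
      rw [clsB_eq_two]
      refine ⟨?_, by simp_all, hsp⟩
      rw [hsp]
      exact fun h => computerO_ne_space pl h.symm
  · rintro ⟨hcls, d, hd, hl⟩
    rw [clsB_eq_two] at hcls
    exact ⟨hcls.2.2, d, hd, by rw [walkA_eq_loopB]; exact hl⟩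

-- ===== VERDICT (by name: the statement is the Claim_ definition above) =====
theorem movablemoves_spec : Claim_equal_movablemoves := by
  intro board player prev_passed _hdom _hpre
  unfold Spec_movablemoves movablemoves movablemoves_alt
  rw [coreA_eq_coreB, coreA_eq_coreB]
  generalize coreB board (some player) = l1
  generalize coreB board (computerO (some player)) = l2
  cases l1 <;> cases l2 <;> simp
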